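-- pv_equiv track=rewrite | github.com/amol-ship-it/agi-core | domains/arc/dataset.py | _gravity_down
-- ===== SOURCE A (Python) =====
-- def _gravity_down(grid):
--     if not grid or not grid[0]:
--         return grid
--     h, w = len(grid), len(grid[0])
--     result = [[0] * w for _ in range(h)]
--     for c in range(w):
--         non_zero = [grid[r][c] for r in range(h) if grid[r][c] != 0]
--         for i, val in enumerate(non_zero):
--             result[h - len(non_zero) + i][c] = val
--     return result
-- ===== SOURCE B (Python) =====
-- def _gravity_down(grid):
--     if not grid or not grid[0]:
--         return grid
--     h, w = len(grid), len(grid[0])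
--     cols = [sorted((grid[r][c] for r in range(h)), key=lambda v: v != 0)
--             for c in range(w)]
--     return [[cols[c][r] for c in range(w)] for r in range(h)]
-- ===== Notes on version B (the rewrite author's own statement) =====
-- stated objective: simpler
-- what changed: Replaces the preallocated zero matrix with scatter-writes at count-offset indices by a per-column stable sort on the boolean key v != 0 (zeros first, non-zeros after in order) followed by a transpose.
import Mathlib
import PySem

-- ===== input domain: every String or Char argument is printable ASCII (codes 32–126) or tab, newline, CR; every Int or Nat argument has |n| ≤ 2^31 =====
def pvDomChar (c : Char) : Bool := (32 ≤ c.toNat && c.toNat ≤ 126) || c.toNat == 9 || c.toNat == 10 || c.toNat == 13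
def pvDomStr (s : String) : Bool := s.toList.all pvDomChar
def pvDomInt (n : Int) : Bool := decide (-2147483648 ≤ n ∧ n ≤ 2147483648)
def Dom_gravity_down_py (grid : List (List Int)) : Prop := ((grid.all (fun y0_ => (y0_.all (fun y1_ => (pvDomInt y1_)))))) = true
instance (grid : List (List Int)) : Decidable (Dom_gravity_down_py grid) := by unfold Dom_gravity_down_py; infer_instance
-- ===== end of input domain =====

-- B replaces A's preallocated zero matrix with scatter writes at count-offset rows by a
-- per-column stable sort on the key (v != 0) followed by a transpose (objective: simpler).

-- ===== PORT A =====
-- result[i][c] = val  (Python mutates the row in place; functional update of the same cell here)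
def pySet2d (res : List (List Int)) (r c : Nat) (v : Int) : List (List Int) :=
  res.set r ((res.getD r []).set c v)

-- literal transliteration of A; grid[r][c] read with getD at nonneg in-range indices (exact there;
-- Pre_ excludes the short-row grids on which Python raises IndexError)
def gravity_down_py (grid : List (List Int)) : List (List Int) :=
  if grid = [] ∨ grid.headD [] = [] then grid
  else
    let h := grid.length
    let w := (grid.headD []).length
    let result := List.replicate h (List.replicate w (0:Int))
    (List.range w).foldl (fun result c =>
      let nonZero := ((List.range h).map (fun r => (grid.getD r []).getD c 0)).filter
        (fun v => decide (v ≠ 0))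
      (PySem.List.enumerate nonZero 0).foldl
        (fun res p => pySet2d res (h - nonZero.length + p.1.toNat) c p.2) result) result

-- ===== PORT B =====
-- literal transliteration of Source B: per-column stable sort with boolean key, then transpose
def gravity_down_py_alt (grid : List (List Int)) : List (List Int) :=
  if grid = [] ∨ grid.headD [] = [] then grid
  else
    let h := grid.length
    let w := (grid.headD []).length
    let cols := (List.range w).map (fun c =>
      PySem.List.sorted ((List.range h).map (fun r => (grid.getD r []).getD c 0))
        (fun v => decide (v ≠ 0)) false)
    (List.range h).map (fun r => (List.range w).map (fun c => (cols.getD c []).getD r 0))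

-- ===== PRECONDITION & SPEC =====
-- Pre_ excludes exactly the grids having a row shorter than the first row: there Python A
-- (and B alike) raises IndexError on grid[r][c].
def Pre_gravity_down_py (grid : List (List Int)) : Prop :=
  ∀ row ∈ grid, (grid.headD []).length ≤ row.length
instance (grid : List (List Int)) : Decidable (Pre_gravity_down_py grid) := by
  unfold Pre_gravity_down_py; infer_instance

def pvWitness_gravity_down_py : List (List Int) := [[1, 0], [0, 2]]

def Spec_gravity_down_py (grid : List (List Int)) (out : List (List Int)) : Prop := out = gravity_down_py_alt grid
instance (grid : List (List Int)) (out : List (List Int)) : Decidable (Spec_gravity_down_py grid out) := by unfold Spec_gravity_down_py; infer_instance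

-- ===== CLAIM (what is proved, stated in full; the proofs are below) =====
def Claim_equal_gravity_down_py : Prop := ∀ (grid : List (List Int)), Dom_gravity_down_py grid → Pre_gravity_down_py grid → Spec_gravity_down_py grid (gravity_down_py grid)

-- ===== LEMMAS AND PROOFS =====

-- read result[r][c] (with defaults) and the shape invariant of the working matrix
def pvGet2d (res : List (List Int)) (r c : Nat) : Int := (res.getD r []).getD c 0
def pvShape (res : List (List Int)) (h w : Nat) : Prop :=
  res.length = h ∧ ∀ row ∈ res, row.length = w

theorem pvShape_set2d {res : List (List Int)} {h w r c : Nat} (hs : pvShape res h w) (v : Int) :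
    pvShape (pySet2d res r c v) h w := by
  obtain ⟨hl, hr⟩ := hs
  by_cases hlt : r < res.length
  · refine ⟨by simp [pySet2d, hl], ?_⟩
    intro row hrow
    rcases List.mem_or_eq_of_mem_set hrow with hmem | heq
    · exact hr _ hmem
    · subst heq
      simp [List.getD_eq_getElem?_getD, List.getElem?_eq_getElem hlt]
      exact hr _ (List.getElem_mem hlt)
  · rw [pySet2d, List.set_eq_of_length_le (by omega)]
    exact ⟨hl, hr⟩

theorem pvGet2d_set2d {res : List (List Int)} {h w : Nat} (hs : pvShape res h w)
    {r c : Nat} (hrh : r < h) (hcw : c < w) (v : Int) (r' c' : Nat) :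
    pvGet2d (pySet2d res r c v) r' c' = if r' = r ∧ c' = c then v else pvGet2d res r' c' := by
  obtain ⟨hl, hr⟩ := hs
  have hrlt : r < res.length := by omega
  have hrowlen : (res.getD r []).length = w := by
    rw [List.getD_eq_getElem?_getD, List.getElem?_eq_getElem hrlt]
    exact hr _ (List.getElem_mem hrlt)
  by_cases hre : r' = r
  · subst hre
    simp only [pvGet2d, pySet2d, List.getD_eq_getElem?_getD, List.getElem?_set_self hrlt]
    by_cases hce : c' = c
    · subst hce
      have h2 : c' < (res[r']?.getD []).length := by
        rw [← List.getD_eq_getElem?_getD]; omega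
      simp [List.getElem?_set_self h2]
    · simp [hce, List.getElem?_set_ne (fun h => hce h.symm)]
  · simp [pvGet2d, pySet2d, hre, List.getD_eq_getElem?_getD, List.getElem?_set_ne (fun h => hre h.symm)]

-- the inner enumerate-foldl writes vs into rows base+s, …, base+s+|vs|-1 of column c
theorem pvInner (c : Nat) (base : Nat) (h w : Nat) (hcw : c < w) :
    ∀ (vs : List Int) (s : Nat) (res : List (List Int)), pvShape res h w →
      base + s + vs.length ≤ h →
      pvShape ((PySem.List.enumerate vs (s : Int)).foldl
          (fun res p => pySet2d res (base + p.1.toNat) c p.2) res) h w ∧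
      ∀ r' c', pvGet2d ((PySem.List.enumerate vs (s : Int)).foldl
          (fun res p => pySet2d res (base + p.1.toNat) c p.2) res) r' c' =
        if c' = c ∧ base + s ≤ r' ∧ r' < base + s + vs.length then vs.getD (r' - base - s) 0
        else pvGet2d res r' c' := by
  intro vs
  induction vs with
  | nil =>
    intro s res hs _
    refine ⟨by simpa [PySem.List.enumerate_nil] using hs, ?_⟩
    intro r' c'
    simp [PySem.List.enumerate_nil]
  | cons v vs ih =>
    intro s res hs hle
    have hcast : ((s:Int) + 1) = ((s+1 : Nat) : Int) := by push_cast; ring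
    rw [PySem.List.enumerate_cons, hcast]
    simp only [List.foldl_cons]
    have hs1 : pvShape (pySet2d res (base + (s:Int).toNat) c v) h w := pvShape_set2d hs v
    have hle1 : base + (s+1) + vs.length ≤ h := by simp at hle; omega
    obtain ⟨ihs, ihv⟩ := ih (s+1) (pySet2d res (base + (s:Int).toNat) c v) hs1 hle1
    refine ⟨ihs, ?_⟩
    intro r' c'
    have hbs : base + (s:Int).toNat < h := by simp at hle ⊢; omega
    rw [ihv r' c', pvGet2d_set2d hs hbs hcw]
    simp only [Int.toNat_natCast, List.length_cons]
    split_ifs with h1 h2 h3 h4 h5 <;> try (exfalso; omega)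
    all_goals try rfl
    · -- inside tail region: vs.getD (r'-base-(s+1)) = (v::vs).getD (r'-base-s)
      have : r' - base - s = (r' - base - (s+1)) + 1 := by omega
      rw [this, List.getD_cons_succ]
    · -- r' = base + s: (v::vs).getD 0 = v
      have : r' - base - s = 0 := by omega
      rw [this, List.getD_cons_zero]

-- stability of the boolean-key insertion sort, specialised to the key (v ≠ 0)
def pvBefore (a b : Int) : Bool := decide ((decide (a ≠ 0) : Bool) < (decide (b ≠ 0) : Bool))

theorem pvBefore_zero (y : Int) : pvBefore 0 y = decide (y ≠ 0) := by
  by_cases hy : y = 0 <;> simp [pvBefore, hy]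

theorem pvBefore_of_nonzero (x y : Int) (hx : x ≠ 0) : pvBefore x y = false := by
  by_cases hy : y = 0 <;> simp [pvBefore, hx, hy]

theorem pvInsertBy_cons (x y : Int) (ys : List Int) :
    PySem.List.insertBy pvBefore x (y :: ys) =
      if pvBefore x y then x :: y :: ys else y :: PySem.List.insertBy pvBefore x ys := rfl

-- inserting a zero into (zeros ++ nonzeros) lands right after the zeros
theorem pvInsertBy_zero (T : List Int) (hT : ∀ y ∈ T, y ≠ 0) :
    ∀ F : List Int, (∀ y ∈ F, y = 0) →
    PySem.List.insertBy pvBefore 0 (F ++ T) = F ++ 0 :: T := by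
  intro F
  induction F with
  | nil =>
    intro _
    cases T with
    | nil => rfl
    | cons t ts =>
      have ht : t ≠ 0 := hT t (by simp)
      rw [List.nil_append, pvInsertBy_cons, pvBefore_zero, if_pos (by simpa using ht)]
      rfl
  | cons f F ih =>
    intro hF
    have hf : f = 0 := hF f (by simp)
    subst hf
    rw [List.cons_append, pvInsertBy_cons, pvBefore_zero, if_neg (by simp),
      ih (fun y hy => hF y (by simp [hy]))]
    rfl

-- inserting a non-zero lands at the very end
theorem pvInsertBy_nonzero (x : Int) (hx : x ≠ 0) (acc : List Int) :
    PySem.List.insertBy pvBefore x acc = acc ++ [x] := by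
  induction acc with
  | nil => rfl
  | cons a acc ih =>
    rw [pvInsertBy_cons, pvBefore_of_nonzero _ _ hx, if_neg (by simp), ih, List.cons_append]

theorem pvFoldl_insert (xs : List Int) :
    ∀ F T : List Int, (∀ y ∈ F, y = 0) → (∀ y ∈ T, y ≠ 0) →
    xs.foldl (fun acc x => PySem.List.insertBy pvBefore x acc) (F ++ T)
      = (F ++ xs.filter (fun v => decide (v = 0))) ++ (T ++ xs.filter (fun v => decide (v ≠ 0))) := by
  induction xs with
  | nil => intro F T _ _; simp
  | cons x xs ih =>
    intro F T hF hT
    simp only [List.foldl_cons]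
    by_cases hx : x = 0
    · subst hx
      rw [pvInsertBy_zero T hT F hF]
      have h0 : F ++ 0 :: T = (F ++ [0]) ++ T := by simp
      rw [h0, ih (F ++ [0]) T
        (by intro y hy; rcases List.mem_append.1 hy with h|h; exact hF y h; simpa using h) hT]
      simp
    · rw [pvInsertBy_nonzero x hx, List.append_assoc,
        ih F (T ++ [x]) hF
        (by intro y hy; rcases List.mem_append.1 hy with h|h; exact hT y h;
            have : y = x := by simpa using h
            rw [this]; exact hx)]
      simp [hx]

theorem pvSorted_bool_key (xs : List Int) :
    PySem.List.sorted xs (fun v => decide (v ≠ 0)) false =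
      xs.filter (fun v => decide (v = 0)) ++ xs.filter (fun v => decide (v ≠ 0)) := by
  have hdef : PySem.List.sorted xs (fun v => decide (v ≠ 0)) false =
      xs.foldl (fun acc x => PySem.List.insertBy pvBefore x acc) [] := rfl
  rw [hdef]
  simpa using pvFoldl_insert xs [] [] (by simp) (by simp)

-- outer loop over the column list: each processed column c' holds its non-zeros bottom-aligned
theorem pvOuter (h w : Nat) (f : Nat → List Int) (hk : ∀ c, (f c).length ≤ h) :
    ∀ (cs : List Nat), (∀ c ∈ cs, c < w) → ∀ res, pvShape res h w →
      pvShape (cs.foldl (fun res c =>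
          (PySem.List.enumerate (f c) 0).foldl
            (fun res p => pySet2d res (h - (f c).length + p.1.toNat) c p.2) res) res) h w ∧
      ∀ r' c', pvGet2d (cs.foldl (fun res c =>
          (PySem.List.enumerate (f c) 0).foldl
            (fun res p => pySet2d res (h - (f c).length + p.1.toNat) c p.2) res) res) r' c' =
        if c' ∈ cs ∧ h - (f c').length ≤ r' ∧ r' < h then (f c').getD (r' - (h - (f c').length)) 0
        else pvGet2d res r' c' := by
  intro cs
  induction cs with
  | nil =>
    intro _ res hs
    refine ⟨hs, ?_⟩
    intro r' c'
    simp
  | cons c cs ih =>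
    intro hcs res hs
    simp only [List.foldl_cons]
    have hc : c < w := hcs c (by simp)
    have hbound : (h - (f c).length) + 0 + (f c).length ≤ h := by
      have := hk c; omega
    obtain ⟨hs1, hv1⟩ := pvInner c (h - (f c).length) h w hc (f c) 0 res hs hbound
    simp only [Nat.cast_zero, Nat.add_zero, Nat.sub_zero] at hs1 hv1
    obtain ⟨hs2, hv2⟩ := ih (fun c' hc' => hcs c' (by simp [hc'])) _ hs1
    refine ⟨hs2, ?_⟩
    intro r' c'
    rw [hv2 r' c', hv1 r' c', Nat.sub_add_cancel (hk c)]
    clear hv1 hv2 hs1 hs2 hs hcs ih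
    by_cases hec : c' = c
    · subst hec
      by_cases hmem : c' ∈ cs <;> by_cases hcond : h - (f c').length ≤ r' ∧ r' < h <;>
        split_ifs <;> tauto
    · simp only [List.mem_cons, hec, false_or]
      split_ifs <;> tauto

theorem pvGet2d_eq {res : List (List Int)} {i j : Nat} (h1 : i < res.length)
    (h2 : j < res[i].length) : res[i][j] = pvGet2d res i j := by
  rw [pvGet2d, List.getD_eq_getElem _ _ h1, List.getD_eq_getElem _ _ h2]

-- one column of B: zeros padded on top, then the non-zeros, read at row i
theorem pvCol_entry (col : List Int) (h : Nat) (hcl : col.length = h) (i : Nat) (hi : i < h) :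
    (col.filter (fun v => decide (v = 0)) ++ col.filter (fun v => decide (v ≠ 0))).getD i 0 =
      if h - (col.filter (fun v => decide (v ≠ 0))).length ≤ i ∧ i < h then
        (col.filter (fun v => decide (v ≠ 0))).getD
          (i - (h - (col.filter (fun v => decide (v ≠ 0))).length)) 0
      else 0 := by
  have hsum : (col.filter (fun v => decide (v = 0))).length +
      (col.filter (fun v => decide (v ≠ 0))).length = h := by
    have h := (List.length_eq_length_filter_add (l := col) (fun v => decide (v = 0))).symm
    simpa [hcl] using h
  set F := col.filter (fun v => decide (v = 0)) with hF
  set N := col.filter (fun v => decide (v ≠ 0)) with hN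
  by_cases hc : h - N.length ≤ i
  · rw [if_pos ⟨hc, hi⟩]
    have hFlen : F.length = h - N.length := by omega
    rw [List.getD_append_right F N 0 i (by omega), hFlen]
  · rw [if_neg (by tauto)]
    have hiF : i < F.length := by omega
    rw [List.getD_append _ _ _ _ hiF, List.getD_eq_getElem _ _ hiF]
    have hmem := List.of_mem_filter (List.getElem_mem hiF)
    simpa using hmem

theorem pv_core (h w : Nat) (col : Nat → List Int) (hcl : ∀ c, (col c).length = h) :
    (List.range w).foldl (fun result c =>
        (PySem.List.enumerate ((col c).filter (fun v => decide (v ≠ 0))) 0).foldl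
          (fun res p =>
            pySet2d res (h - ((col c).filter (fun v => decide (v ≠ 0))).length + p.1.toNat) c p.2)
          result)
      (List.replicate h (List.replicate w (0:Int)))
    = (List.range h).map (fun r => (List.range w).map (fun c =>
        (((List.range w).map
            (fun c => PySem.List.sorted (col c) (fun v => decide (v ≠ 0)) false)).getD c []).getD r 0)) := by
  have hk : ∀ c, ((col c).filter (fun v => decide (v ≠ 0))).length ≤ h := by
    intro c
    calc ((col c).filter (fun v => decide (v ≠ 0))).length ≤ (col c).length :=
      List.length_filter_le _ _
    _ = h := hcl c
  have hs0 : pvShape (List.replicate h (List.replicate w (0:Int))) h w := by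
    refine ⟨by simp, ?_⟩
    intro row hrow
    rw [List.eq_of_mem_replicate hrow]
    simp
  obtain ⟨⟨hlen, hrows⟩, hval⟩ :=
    pvOuter h w (fun c => (col c).filter (fun v => decide (v ≠ 0))) hk (List.range w)
      (by intro c hc; simpa using hc) _ hs0
  apply List.ext_getElem (by simpa using hlen)
  intro i hi1 hi2
  have hih : i < h := by omega
  rw [List.getElem_map, List.getElem_range]
  apply List.ext_getElem
  · rw [hrows _ (List.getElem_mem hi1)]
    simp
  · intro j hj1 hj2
    have hjw : j < w := by simpa using hj2
    rw [pvGet2d_eq hi1 hj1, hval i j]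
    simp only [List.getElem_map, List.getElem_range]
    rw [PySem.List.getD_map_range _ _ _ _ hjw, pvSorted_bool_key,
      pvCol_entry (col j) h (hcl j) i hih]
    have hmem : j ∈ List.range w := by simpa using hjw
    simp only [hmem, true_and]
    split_ifs with h1
    · rfl
    · rw [pvGet2d]
      simp [List.getD_eq_getElem?_getD, hih, hjw]

theorem pv_ports_eq (grid : List (List Int)) :
    gravity_down_py grid = gravity_down_py_alt grid := by
  by_cases hg : grid = [] ∨ grid.headD [] = []
  · rw [gravity_down_py, gravity_down_py_alt, if_pos hg, if_pos hg]
  · rw [gravity_down_py, gravity_down_py_alt, if_neg hg, if_neg hg]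
    exact pv_core grid.length (grid.headD []).length
      (fun c => (List.range grid.length).map (fun r => (grid.getD r []).getD c 0))
      (fun c => by simp)

-- ===== VERDICT (by name: the statement is the Claim_ definition above) =====
theorem gravity_down_py_spec : Claim_equal_gravity_down_py := by
  intro grid _ _
  unfold Spec_gravity_down_py
  exact pv_ports_eq grid
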